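-- pv_equiv track=rewrite | github.com/unchainedraggedy/algo-yandex | урок2/football.py | bestteamsum
-- ===== SOURCE A (Python) =====
-- def bestteamsum(players):
--     bestsum = 0
--     nowsum = 0
--     last = 0
--     for first in range(len(players)):
--         while last < len(players) and (last == first or players[first] + players[first + 1] >= players[last]):
--             nowsum +=players[last]
--             last += 1
--         bestsum = max(bestsum, nowsum)
--         nowsum -= players[first]
--     return bestsum
-- ===== SOURCE B (Python) =====
-- def bestteamsum(players):
--     n = len(players)
--
--     # sparse table: maxtab[j][i] = max(players[i : i + 2**j])
--     maxtab = []
--     if n > 0: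
--         maxtab.append(players[:])
--         j = 1
--         while (1 << j) <= n:
--             prev = maxtab[-1]
--             half = 1 << (j - 1)
--             maxtab.append([max(prev[i], prev[i + half])
--                            for i in range(n - (1 << j) + 1)])
--             j += 1
--
--     def first_above(start, x):
--         # least l >= start with players[l] > x, or n if there is none
--         cur = start
--         for j in range(len(maxtab) - 1, -1, -1):
--             step = 1 << j
--             if cur + step <= n and maxtab[j][cur] <= x:
--                 cur += step
--         return cur
--
--     prefix = [0]
--     s = 0
--     for p in players:
--         s += p
--         prefix.append(s)
--
--     best = 0
--     end = 0
--     for first in range(n):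
--         if end < first + 1:
--             end = first + 1
--         if end < n:
--             end = first_above(end, players[first] + players[first + 1])
--         best = max(best, prefix[end] - prefix[first])
--     return best
-- ===== Notes on version B (the rewrite author's own statement) =====
-- stated objective: alternative
-- what changed: Replaces A's single running-sum two-pointer scan by prefix sums plus a sparse table of range maxima whose power-of-two jumps (binary lifting) locate each window end, with the candidate sum read off as a prefix difference.
import Mathlib
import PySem

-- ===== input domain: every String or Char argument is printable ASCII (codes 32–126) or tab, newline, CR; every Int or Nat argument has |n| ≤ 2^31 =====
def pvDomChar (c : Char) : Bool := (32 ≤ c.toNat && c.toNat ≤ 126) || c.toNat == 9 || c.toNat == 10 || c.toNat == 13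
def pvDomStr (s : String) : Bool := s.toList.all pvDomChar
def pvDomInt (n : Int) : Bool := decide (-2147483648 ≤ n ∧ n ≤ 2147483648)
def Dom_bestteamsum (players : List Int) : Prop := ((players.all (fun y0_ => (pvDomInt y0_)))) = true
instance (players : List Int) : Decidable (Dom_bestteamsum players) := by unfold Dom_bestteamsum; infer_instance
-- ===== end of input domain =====

-- B replaces A's running-sum two-pointer scan by prefix sums plus a sparse table of range
-- maxima whose power-of-two jumps locate each window end (objective: alternative).

-- ===== PORT A =====
-- inner `while` of A; indices are always in range during A's execution (players[first+1]
-- is only read when first < last < n), so the pyGetD default 0 is never observed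
def pvWhileA (players : List Int) (first : Int) (nowsum last : Int) : Int × Int :=
  if h : last < (players.length : Int) ∧ (last = first ∨
      PySem.List.pyGetD players first 0 + PySem.List.pyGetD players (first + 1) 0 ≥
        PySem.List.pyGetD players last 0)
  then pvWhileA players first (nowsum + PySem.List.pyGetD players last 0) (last + 1)
  else (nowsum, last)
termination_by ((players.length : Int) - last).toNat
decreasing_by omega

def bestteamsum (players : List Int) : Int :=
  ((PySem.List.pyRange 0 (players.length : Int) 1).foldl
    (fun (st : Int × Int × Int) first =>
      let r := pvWhileA players first st.2.1 st.2.2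
      (max st.1 r.1, r.1 - PySem.List.pyGetD players first 0, r.2))
    (0, 0, 0)).1

-- ===== PORT B =====
-- the `while (1 << j) <= n` loop of Source B building the sparse table maxtab
def pvTabLoop (players : List Int) (maxtab : List (List Int)) (j : Nat) : List (List Int) :=
  if h : (1 <<< j) ≤ players.length then
    let prev := PySem.List.pyGetD maxtab (-1) []
    let half : Nat := 1 <<< (j - 1)
    pvTabLoop players
      (maxtab ++ [(PySem.List.pyRange 0 ((players.length : Int) - ((1 <<< j : Nat) : Int) + 1) 1).map
        (fun i => max (PySem.List.pyGetD prev i 0) (PySem.List.pyGetD prev (i + (half : Int)) 0))])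
      (j + 1)
  else maxtab
termination_by players.length - j
decreasing_by
  have h2 : j < 1 <<< j := by rw [Nat.one_shiftLeft]; exact Nat.lt_two_pow_self
  omega

-- Source B's first_above: loop indices j ≥ 0, so `1 << j` is ported with a Nat shift
def pvFirstAbove (players : List Int) (maxtab : List (List Int)) (start x : Int) : Int :=
  (PySem.List.pyRange ((maxtab.length : Int) - 1) (-1) (-1)).foldl
    (fun cur j =>
      if cur + ((1 <<< j.toNat : Nat) : Int) ≤ (players.length : Int) ∧
          PySem.List.pyGetD (PySem.List.pyGetD maxtab j []) cur 0 ≤ x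
      then cur + ((1 <<< j.toNat : Nat) : Int) else cur)
    start

def bestteamsum_alt (players : List Int) : Int :=
  let n := players.length
  let maxtab := if 0 < n then pvTabLoop players [players] 1 else []
  let pre := (players.foldl
    (fun (acc : List Int × Int) p => (acc.1 ++ [acc.2 + p], acc.2 + p)) ([0], 0)).1
  ((PySem.List.pyRange 0 (n : Int) 1).foldl
    (fun (st : Int × Int) first =>
      let e0 : Int := if st.2 < first + 1 then first + 1 else st.2
      let e : Int := if e0 < (n : Int)
        then pvFirstAbove players maxtab e0
          (PySem.List.pyGetD players first 0 + PySem.List.pyGetD players (first + 1) 0)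
        else e0
      (max st.1 (PySem.List.pyGetD pre e 0 - PySem.List.pyGetD pre first 0), e))
    (0, 0)).1

-- ===== PRECONDITION & SPEC =====
def Spec_bestteamsum (players : List Int) (out : Int) : Prop := out = bestteamsum_alt players
instance (players : List Int) (out : Int) : Decidable (Spec_bestteamsum players out) := by
  unfold Spec_bestteamsum; infer_instance

-- ===== CLAIM (what is proved, stated in full; the proofs are below) =====
def Claim_equal_bestteamsum : Prop := ∀ (players : List Int), Dom_bestteamsum players →
  Spec_bestteamsum players (bestteamsum players)

-- ===== LEMMAS AND PROOFS =====

-- element at a Nat index, with the Python-port default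
def pvG (p : List Int) (i : Nat) : Int := p.getD i 0

-- sum of the window p[a:b]
def pvS (p : List Int) (a b : Nat) : Int := ((p.drop a).take (b - a)).sum

-- first index l ≥ s with l out of range or p[l] > x (the scan A's while performs)
def pvFF (p : List Int) (x : Int) (s : Nat) : Nat :=
  if h : s < p.length ∧ pvG p s ≤ x then pvFF p x (s + 1) else s
termination_by p.length - s
decreasing_by omega

-- range maximum over p[i : i + 2^j]
def pvRM (p : List Int) : Nat → Nat → Int
  | 0, i => pvG p i
  | j + 1, i => max (pvRM p j i) (pvRM p j (i + (1 <<< j)))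

-- level j of the sparse table
def pvLevel (p : List Int) (j : Nat) : List Int :=
  (List.range (p.length - 2 ^ j + 1)).map (fun i => pvRM p j i)

-- A's window end when the scan enters iteration k with pointer `last`
def pvEndT (p : List Int) (k last : Nat) : Nat :=
  if max last (k + 1) < p.length
  then pvFF p (pvG p k + pvG p (k + 1)) (max last (k + 1))
  else max last (k + 1)

-- A's pointer after processing firsts 0..k-1
def pvLA (p : List Int) : Nat → Nat
  | 0 => 0
  | k + 1 => pvEndT p k (pvLA p k)

lemma pvS_split (p : List Int) {a b c : Nat} (hab : a ≤ b) (hbc : b ≤ c) :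
    pvS p a b + pvS p b c = pvS p a c := by
  unfold pvS
  rw [show c - a = (b - a) + (c - b) by omega, List.take_add, List.sum_append, List.drop_drop,
    Nat.add_sub_cancel' hab]

lemma pvS_cons (p : List Int) {a b : Nat} (ha : a < p.length) (hab : a < b) :
    pvS p a b = pvG p a + pvS p (a + 1) b := by
  unfold pvS pvG
  rw [List.drop_eq_getElem_cons ha]
  rw [show b - a = (b - (a + 1)) + 1 by omega, List.take_succ_cons, List.sum_cons,
    List.getD_eq_getElem p 0 ha]

lemma pvFF_ge (p : List Int) (x : Int) (s : Nat) : s ≤ pvFF p x s := by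
  rw [pvFF]
  split
  · next h => exact le_trans (by omega) (pvFF_ge p x (s + 1))
  · exact le_refl s
termination_by p.length - s
decreasing_by omega

lemma pvFF_le (p : List Int) (x : Int) (s : Nat) (hs : s ≤ p.length) :
    pvFF p x s ≤ p.length := by
  rw [pvFF]
  split
  · next h => exact pvFF_le p x (s + 1) (by omega)
  · exact hs
termination_by p.length - s
decreasing_by omega

lemma pvFF_cond (p : List Int) (x : Int) (s : Nat) :
    ∀ l, s ≤ l → l < pvFF p x s → l < p.length ∧ pvG p l ≤ x := by
  rw [pvFF]
  split
  · next h =>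
    intro l h1 h2
    rcases Nat.eq_or_lt_of_le h1 with he | hlt
    · subst he; exact h
    · exact pvFF_cond p x (s + 1) l hlt h2
  · next h =>
    intro l h1 h2
    omega
termination_by p.length - s
decreasing_by omega

lemma pvFF_stop (p : List Int) (x : Int) (s : Nat) :
    ¬ (pvFF p x s < p.length ∧ pvG p (pvFF p x s) ≤ x) := by
  rw [pvFF]
  split
  · next h => exact pvFF_stop p x (s + 1)
  · next h => exact h
termination_by p.length - s
decreasing_by omega

lemma pvFF_ge_of (p : List Int) (x : Int) (s m : Nat)
    (hm : ∀ l, s ≤ l → l < m → l < p.length ∧ pvG p l ≤ x) (hsm : s ≤ m) :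
    m ≤ pvFF p x s := by
  rw [pvFF]
  split
  · next h =>
    rcases Nat.eq_or_lt_of_le hsm with he | hlt
    · exact le_trans (le_of_eq he.symm) (le_trans (by omega) (pvFF_ge p x (s + 1)))
    · exact pvFF_ge_of p x (s + 1) m (fun l h1 h2 => hm l (by omega) h2) hlt
  · next h =>
    by_contra hcon
    exact h (hm s (le_refl s) (by omega))
termination_by p.length - s
decreasing_by omega

lemma pvFF_le_of (p : List Int) (x : Int) (s l : Nat) (hl : s ≤ l)
    (hfail : ¬ (l < p.length ∧ pvG p l ≤ x)) : pvFF p x s ≤ l := by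
  rw [pvFF]
  split
  · next h =>
    have hne : s ≠ l := fun he => hfail (he ▸ h)
    exact pvFF_le_of p x (s + 1) l (by omega) hfail
  · next h => exact hl
termination_by p.length - s
decreasing_by omega

lemma pvRM_le_iff (p : List Int) (x : Int) :
    ∀ (j i : Nat), (pvRM p j i ≤ x ↔ ∀ l, i ≤ l → l < i + 2 ^ j → pvG p l ≤ x) := by
  intro j
  induction j with
  | zero =>
    intro i
    simp only [pvRM, pow_zero]
    constructor
    · intro h l h1 h2
      have : l = i := by omega
      subst this; exact h
    · intro h
      exact h i (le_refl i) (by omega)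
  | succ j ih =>
    intro i
    have hp : 2 ^ (j + 1) = 2 ^ j + 2 ^ j := by rw [pow_succ]; omega
    simp only [pvRM, Nat.one_shiftLeft, max_le_iff, ih]
    constructor
    · rintro ⟨h1, h2⟩ l hl1 hl2
      rcases Nat.lt_or_ge l (i + 2 ^ j) with h' | h'
      · exact h1 l hl1 h'
      · exact h2 l h' (by omega)
    · intro h
      exact ⟨fun l a b => h l a (by omega), fun l a b => h l (by omega) (by omega)⟩

lemma pvLevel_getD (p : List Int) {j i : Nat} (hi : i < p.length - 2 ^ j + 1) :
    (pvLevel p j).getD i 0 = pvRM p j i := by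
  unfold pvLevel
  exact PySem.List.getD_map_range _ _ _ _ hi

lemma pvLevel_zero (p : List Int) (h : 0 < p.length) : pvLevel p 0 = p := by
  apply List.ext_getElem
  · simp [pvLevel]; omega
  · intro i h1 h2
    simp only [pvLevel, List.getElem_map, List.getElem_range]
    simp [pvRM, pvG, List.getD, List.getElem?_eq_getElem h2]

-- loop invariant of the sparse-table build
lemma pvTabLoop_spec (p : List Int) :
    ∀ (d j : Nat) (acc : List (List Int)), p.length - j ≤ d → 1 ≤ j → acc.length = j →
    (∀ jj, jj < j → acc.getD jj [] = pvLevel p jj) → 2 ^ (j - 1) ≤ p.length →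
    (∀ jj, jj < (pvTabLoop p acc j).length →
       (pvTabLoop p acc j).getD jj [] = pvLevel p jj) ∧
    p.length < 2 ^ (pvTabLoop p acc j).length ∧
    j ≤ (pvTabLoop p acc j).length := by
  intro d
  induction d with
  | zero =>
    intro j acc hd hj hlen hlev hpow
    rw [pvTabLoop]
    have hno : ¬ (1 <<< j ≤ p.length) := by
      rw [Nat.one_shiftLeft]
      have := Nat.lt_two_pow_self (n := j)
      omega
    rw [dif_neg hno]
    rw [Nat.one_shiftLeft] at hno
    refine ⟨fun jj h => hlev jj (by omega), ?_, by omega⟩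
    rw [hlen]
    omega
  | succ d ih =>
    intro j acc hd hj hlen hlev hpow
    rw [pvTabLoop]
    by_cases h : (1 <<< j) ≤ p.length
    · rw [dif_pos h]
      simp only []
      rw [Nat.one_shiftLeft] at h
      obtain ⟨j', rfl⟩ : ∃ j', j = j' + 1 := ⟨j - 1, by omega⟩
      have hpos : 0 < (2 : Nat) ^ j' := Nat.two_pow_pos j'
      have hne : acc ≠ [] := by
        intro he; rw [he] at hlen; simp at hlen
      have hprev : PySem.List.pyGetD acc (-1) [] = pvLevel p j' := by
        rw [PySem.List.pyGetD_neg_one acc [] hne, List.getLast_eq_getElem hne,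
          ← List.getD_eq_getElem acc [] (by omega)]
        simp only [hlen, Nat.add_sub_cancel]
        exact hlev j' (by omega)
      have hpj : 2 ^ (j' + 1) = 2 ^ j' + 2 ^ j' := by rw [pow_succ]; omega
      have hnew : (PySem.List.pyRange 0
            ((p.length : Int) - ((1 <<< (j' + 1) : Nat) : Int) + 1) 1).map
          (fun i => max (PySem.List.pyGetD (PySem.List.pyGetD acc (-1) []) i 0)
            (PySem.List.pyGetD (PySem.List.pyGetD acc (-1) [])
              (i + ((1 <<< (j' + 1 - 1) : Nat) : Int)) 0))
          = pvLevel p (j' + 1) := by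
        rw [hprev]
        simp only [Nat.add_sub_cancel, Nat.one_shiftLeft]
        rw [show (p.length : Int) - ((2 ^ (j' + 1) : Nat) : Int) + 1
            = ((p.length - 2 ^ (j' + 1) + 1 : Nat) : Int) by omega]
        rw [PySem.List.pyRange_zero_nat, List.map_map]
        rw [show pvLevel p (j' + 1)
            = (List.range (p.length - 2 ^ (j' + 1) + 1)).map (fun i => pvRM p (j' + 1) i)
            from rfl]
        apply List.map_congr_left
        intro i hi
        rw [List.mem_range] at hi
        simp only [Function.comp]
        rw [show ((i : Int) + ((2 ^ j' : Nat) : Int)) = ((i + 2 ^ j' : Nat) : Int) by omega]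
        rw [PySem.List.pyGetD_natCast, PySem.List.pyGetD_natCast]
        rw [pvLevel_getD p (j := j') (i := i) (by omega),
          pvLevel_getD p (j := j') (i := i + 2 ^ j') (by omega)]
        simp [pvRM, Nat.one_shiftLeft]
      rw [hnew]
      have hres := ih (j' + 2) (acc ++ [pvLevel p (j' + 1)]) (by omega) (by omega)
        (by simp only [List.length_append, List.length_cons, List.length_nil, hlen])
        (by
          intro jj hjj
          rcases Nat.lt_or_ge jj (j' + 1) with h' | h'
          · rw [List.getD_append acc [pvLevel p (j' + 1)] [] jj (by omega)]
            exact hlev jj h'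
          · have : jj = j' + 1 := by omega
            subst this
            rw [show j' + 1 = acc.length by omega]
            simp)
        (by rw [show j' + 2 - 1 = j' + 1 by omega]; exact h)
      exact ⟨hres.1, hres.2.1, le_trans (by omega) hres.2.2⟩
    · rw [dif_neg h]
      rw [Nat.one_shiftLeft] at h
      refine ⟨fun jj hh => hlev jj (by omega), ?_, by omega⟩
      rw [hlen]
      omega

-- descending-levels invariant of Source B's first_above loop
lemma pvQuery_loop (p : List Int) (mt : List (List Int)) (x : Int) (s : Nat)
    (hmt : ∀ jj, jj < mt.length → mt.getD jj [] = pvLevel p jj) (hs : s ≤ p.length) :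
    ∀ (j : Nat), j < mt.length → ∀ (cur : Nat), s ≤ cur → cur ≤ pvFF p x s →
    pvFF p x s - cur < 2 ^ (j + 1) →
    (PySem.List.pyRange (j : Int) (-1) (-1)).foldl
      (fun cur j =>
        if cur + ((1 <<< j.toNat : Nat) : Int) ≤ (p.length : Int) ∧
            PySem.List.pyGetD (PySem.List.pyGetD mt j []) cur 0 ≤ x
        then cur + ((1 <<< j.toNat : Nat) : Int) else cur)
      (cur : Int) = ((pvFF p x s : Nat) : Int) := by
  intro j
  induction j with
  | zero =>
    intro hj cur hcur1 hcur2 hcur3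
    rw [PySem.List.pyRange_neg_one_cons (by omega), show ((0 : Nat) : Int) - 1 = -1 by omega,
      PySem.List.pyRange_neg_one_eq_nil (le_refl _)]
    simp only [List.foldl_cons, List.foldl_nil, Int.toNat_natCast]
    have h20 : (2 : Nat) ^ 0 = 1 := pow_zero 2
    have h21 : (2 : Nat) ^ (0 + 1) = 2 := by rw [pow_succ, pow_zero]; omega
    -- one step at level 0 pins cur to pvFF
    by_cases hcc : cur + 2 ^ 0 ≤ p.length
    · have hmt0 : PySem.List.pyGetD mt ((0 : Nat) : Int) [] = pvLevel p 0 := by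
        rw [PySem.List.pyGetD_natCast]
        exact hmt 0 hj
      by_cases hrm : pvRM p 0 cur ≤ x
      · rw [if_pos]
        · have hadv : cur + 2 ^ 0 ≤ pvFF p x s := by
            apply pvFF_ge_of p x s (cur + 2 ^ 0) _ (by omega)
            intro l h1 h2
            rcases Nat.lt_or_ge l cur with h' | h'
            · exact pvFF_cond p x s l h1 (by omega)
            · refine ⟨by omega, ?_⟩
              exact (pvRM_le_iff p x 0 cur).mp hrm l h' h2
          rw [show (1 <<< 0 : Nat) = 2 ^ 0 from rfl]
          omega
        · constructor
          · rw [show (1 <<< 0 : Nat) = 2 ^ 0 from rfl]; omega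
          · rw [hmt0, PySem.List.pyGetD_natCast, pvLevel_getD p (j := 0) (i := cur) (by omega)]
            exact hrm
      · rw [if_neg]
        · -- level-0 failure: cur itself fails, so cur = pvFF
          have hble : pvFF p x s ≤ cur := by
            apply pvFF_le_of p x s cur hcur1
            intro hcon
            exact hrm (by simpa [pvRM] using hcon.2)
          omega
        · intro hcon
          rw [hmt0, PySem.List.pyGetD_natCast, pvLevel_getD p (j := 0) (i := cur) (by omega)] at hcon
          exact hrm hcon.2
    · rw [if_neg]
      · have hble : pvFF p x s ≤ p.length := pvFF_le p x s hs
        omega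
      · intro hcon
        have := hcon.1
        rw [show (1 <<< 0 : Nat) = 2 ^ 0 from rfl] at this
        omega
  | succ j ih =>
    intro hj cur hcur1 hcur2 hcur3
    rw [PySem.List.pyRange_neg_one_cons (by omega),
      show ((j + 1 : Nat) : Int) - 1 = ((j : Nat) : Int) by push_cast; ring]
    simp only [List.foldl_cons, Int.toNat_natCast]
    have hpos : 0 < (2 : Nat) ^ j := Nat.two_pow_pos j
    have hpos1 : 0 < (2 : Nat) ^ (j + 1) := Nat.two_pow_pos (j + 1)
    have hpj : (2 : Nat) ^ (j + 1 + 1) = 2 ^ (j + 1) + 2 ^ (j + 1) := by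
      rw [pow_succ]; ring
    have hmtj : PySem.List.pyGetD mt ((j + 1 : Nat) : Int) [] = pvLevel p (j + 1) := by
      rw [PySem.List.pyGetD_natCast]
      exact hmt (j + 1) hj
    by_cases hcc : cur + 2 ^ (j + 1) ≤ p.length
    · by_cases hrm : pvRM p (j + 1) cur ≤ x
      · rw [if_pos]
        · have hadv : cur + 2 ^ (j + 1) ≤ pvFF p x s := by
            apply pvFF_ge_of p x s (cur + 2 ^ (j + 1)) _ (by omega)
            intro l h1 h2
            rcases Nat.lt_or_ge l cur with h' | h'
            · exact pvFF_cond p x s l h1 (by omega)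
            · refine ⟨by omega, ?_⟩
              exact (pvRM_le_iff p x (j + 1) cur).mp hrm l h' h2
          rw [show (cur : Int) + ((1 <<< (j + 1) : Nat) : Int)
              = ((cur + 2 ^ (j + 1) : Nat) : Int) by rw [Nat.one_shiftLeft]; omega]
          exact ih (by omega) (cur + 2 ^ (j + 1)) (by omega) hadv (by omega)
        · constructor
          · rw [Nat.one_shiftLeft]; omega
          · rw [hmtj, PySem.List.pyGetD_natCast, pvLevel_getD p (j := j + 1) (i := cur) (by omega)]
            exact hrm
      · rw [if_neg]
        · -- some element of the block fails, so pvFF - cur < 2^(j+1)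
          have hex : ∃ l, cur ≤ l ∧ l < cur + 2 ^ (j + 1) ∧ ¬ pvG p l ≤ x := by
            by_contra hcon
            push_neg at hcon
            exact hrm ((pvRM_le_iff p x (j + 1) cur).mpr (fun l a b => hcon l a b))
          obtain ⟨l, hl1, hl2, hl3⟩ := hex
          have hble : pvFF p x s ≤ l :=
            pvFF_le_of p x s l (by omega) (fun hcon => hl3 hcon.2)
          exact ih (by omega) cur hcur1 hcur2 (by omega)
        · intro hcon
          rw [hmtj, PySem.List.pyGetD_natCast, pvLevel_getD p (j := j + 1) (i := cur) (by omega)] at hcon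
          exact hrm hcon.2
    · rw [if_neg]
      · have hble : pvFF p x s ≤ p.length := pvFF_le p x s hs
        exact ih (by omega) cur hcur1 hcur2 (by omega)
      · intro hcon
        have := hcon.1
        rw [Nat.one_shiftLeft] at this
        omega

lemma pvFirstAbove_eq (p : List Int) (mt : List (List Int)) (x : Int) (s : Nat)
    (hmt : ∀ jj, jj < mt.length → mt.getD jj [] = pvLevel p jj)
    (hLn : p.length < 2 ^ mt.length) (hL1 : 1 ≤ mt.length) (hs : s ≤ p.length) :
    pvFirstAbove p mt (s : Int) x = ((pvFF p x s : Nat) : Int) := by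
  unfold pvFirstAbove
  rw [show ((mt.length : Int) - 1) = ((mt.length - 1 : Nat) : Int) by omega]
  apply pvQuery_loop p mt x s hmt hs (mt.length - 1) (by omega) s (le_refl s)
    (pvFF_ge p x s)
  have hle := pvFF_le p x s hs
  have : 2 ^ (mt.length - 1 + 1) = 2 ^ mt.length := by congr 1; omega
  omega

lemma pvEndT_ge (p : List Int) (k last : Nat) :
    k + 1 ≤ pvEndT p k last ∧ last ≤ pvEndT p k last := by
  unfold pvEndT
  split
  · have := pvFF_ge p (pvG p k + pvG p (k + 1)) (max last (k + 1))
    omega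
  · omega

lemma pvEndT_le (p : List Int) (k last : Nat) (h1 : last ≤ p.length)
    (h2 : k + 1 ≤ p.length) : pvEndT p k last ≤ p.length := by
  unfold pvEndT
  split
  · exact pvFF_le p _ _ (by omega)
  · omega

-- the while loop runs from `last` to a stopping point m: generic characterization
lemma pvWhileA_eq (p : List Int) (first : Int) :
    ∀ (d : Nat) (nowsum : Int) (last m : Nat), m - last ≤ d → last ≤ m → m ≤ p.length →
    (∀ l, last ≤ l → l < m →
      (l : Int) = first ∨ PySem.List.pyGetD p first 0 + PySem.List.pyGetD p (first + 1) 0 ≥ pvG p l) →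
    (m = p.length ∨ ¬ ((m : Int) = first ∨
      PySem.List.pyGetD p first 0 + PySem.List.pyGetD p (first + 1) 0 ≥ pvG p m)) →
    pvWhileA p first nowsum (last : Int) = (nowsum + pvS p last m, (m : Int)) := by
  intro d
  induction d with
  | zero =>
    intro nowsum last m hd hlm hmn hcond hstop
    have heq : last = m := by omega
    subst heq
    rw [pvWhileA, dif_neg]
    · simp [pvS]
    · intro hcon
      rcases hstop with h | h
      · omega
      · rcases hcon.2 with h' | h'
        · exact h (Or.inl h')
        · rw [PySem.List.pyGetD_natCast] at h'
          exact h (Or.inr h')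
  | succ d ih =>
    intro nowsum last m hd hlm hmn hcond hstop
    rcases Nat.eq_or_lt_of_le hlm with heq | hlt
    · subst heq
      rw [pvWhileA, dif_neg]
      · simp [pvS]
      · intro hcon
        rcases hstop with h | h
        · omega
        · rcases hcon.2 with h' | h'
          · exact h (Or.inl h')
          · rw [PySem.List.pyGetD_natCast] at h'
            exact h (Or.inr h')
    · rw [pvWhileA, dif_pos]
      · rw [show (last : Int) + 1 = ((last + 1 : Nat) : Int) by push_cast; ring,
          ih (nowsum + PySem.List.pyGetD p (last : Int) 0) (last + 1) m (by omega) (by omega)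
            hmn (fun l h1 h2 => hcond l (by omega) h2) hstop]
        rw [PySem.List.pyGetD_natCast]
        have hsplit : pvS p last m = pvG p last + pvS p (last + 1) m :=
          pvS_cons p (a := last) (b := m) (by omega) hlt
        unfold pvG at hsplit
        rw [Prod.mk.injEq]
        exact ⟨by omega, rfl⟩
      · refine ⟨?_, ?_⟩
        · exact_mod_cast (show last < p.length by omega)
        · rcases hcond last (le_refl _) hlt with h | h
          · exact Or.inl h
          · right
            rw [PySem.List.pyGetD_natCast]
            exact h

-- the while loop at iteration k goes from pvLA k exactly to pvLA (k+1)
lemma pvWhileA_step (p : List Int) {k : Nat} (hk : k < p.length)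
    (hk0 : k = 0 ∨ k ≤ pvLA p k) (hla : pvLA p k ≤ p.length) (nowsum : Int) :
    pvWhileA p (k : Int) nowsum ((pvLA p k : Nat) : Int)
      = (nowsum + pvS p (pvLA p k) (pvLA p (k + 1)), ((pvLA p (k + 1) : Nat) : Int)) := by
  have hEnd : pvLA p (k + 1) = pvEndT p k (pvLA p k) := rfl
  have hge := pvEndT_ge p k (pvLA p k)
  have hle := pvEndT_le p k (pvLA p k) hla (by omega)
  apply pvWhileA_eq p (k : Int) (pvLA p (k + 1)) nowsum (pvLA p k) (pvLA p (k + 1))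
    (by omega) (by rw [hEnd]; exact hge.2) (by rw [hEnd]; exact hle)
  · intro l h1 h2
    rw [hEnd] at h2
    by_cases hls : l < max (pvLA p k) (k + 1)
    · left
      have : l = k := by
        rcases hk0 with h | h
        · have h0 : pvLA p k = 0 := by rw [h]; rfl
          omega
        · omega
      exact_mod_cast this
    · right
      unfold pvEndT at h2
      have hmx : max (pvLA p k) (k + 1) < p.length := by
        by_cases hc : max (pvLA p k) (k + 1) < p.length
        · exact hc
        · rw [if_neg hc] at h2; omega
      rw [if_pos hmx] at h2
      have := pvFF_cond p (pvG p k + pvG p (k + 1)) (max (pvLA p k) (k + 1)) l (by omega) h2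
      rw [PySem.List.pyGetD_natCast, show (k : Int) + 1 = ((k + 1 : Nat) : Int) by push_cast; ring,
        PySem.List.pyGetD_natCast]
      exact this.2
  · by_cases hend : pvLA p (k + 1) < p.length
    · right
      intro hcon
      rcases hcon with h | h
      · have : pvLA p (k + 1) = k := by exact_mod_cast h
        omega
      · rw [PySem.List.pyGetD_natCast,
          show (k : Int) + 1 = ((k + 1 : Nat) : Int) by push_cast; ring,
          PySem.List.pyGetD_natCast] at h
        rw [hEnd] at hend h
        have hs1 : max (pvLA p k) (k + 1) < p.length := by
          unfold pvEndT at hend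
          by_cases hc : max (pvLA p k) (k + 1) < p.length
          · exact hc
          · rw [if_neg hc] at hend; omega
        have hstop := pvFF_stop p (pvG p k + pvG p (k + 1)) (max (pvLA p k) (k + 1))
        unfold pvEndT at hend h
        rw [if_pos hs1] at hend h
        exact hstop ⟨hend, h⟩
    · left
      omega

-- A's fold step and B's fold step, named (proof-side only; definitionally the port lambdas)
def pvStepA (p : List Int) (st : Int × Int × Int) (first : Int) : Int × Int × Int :=
  let r := pvWhileA p first st.2.1 st.2.2
  (max st.1 r.1, r.1 - PySem.List.pyGetD p first 0, r.2)

def pvPreL (p : List Int) : List Int :=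
  (p.foldl (fun (a : List Int × Int) q => (a.1 ++ [a.2 + q], a.2 + q)) ([0], 0)).1

def pvStepB (p : List Int) (mt : List (List Int)) (st : Int × Int) (first : Int) : Int × Int :=
  let e0 : Int := if st.2 < first + 1 then first + 1 else st.2
  let e : Int := if e0 < (p.length : Int)
    then pvFirstAbove p mt e0
      (PySem.List.pyGetD p first 0 + PySem.List.pyGetD p (first + 1) 0)
    else e0
  (max st.1 (PySem.List.pyGetD (pvPreL p) e 0 - PySem.List.pyGetD (pvPreL p) first 0), e)

-- prefix list built by Source B's loop = the partial sums
lemma pvPre_fold : ∀ (l : List Int) (acc : List Int) (s : Int),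
    (l.foldl (fun (a : List Int × Int) p => (a.1 ++ [a.2 + p], a.2 + p)) (acc, s)).1
      = acc ++ (List.range l.length).map (fun i => s + (l.take (i + 1)).sum) := by
  intro l
  induction l with
  | nil => intro acc s; simp
  | cons x xs ih =>
    intro acc s
    simp only [List.foldl_cons]
    rw [ih (acc ++ [s + x]) (s + x), List.length_cons, List.range_succ_eq_map,
      List.map_cons, List.map_map, List.append_assoc, List.singleton_append]
    congr 1
    congr 1
    · simp
    · exact List.map_congr_left (fun i _ => by
        simp [Function.comp, List.take_succ_cons]; ring)

lemma pvPre_getD (p : List Int) {i : Nat} (hi : i ≤ p.length) :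
    (pvPreL p).getD i 0 = pvS p 0 i := by
  unfold pvPreL
  rw [pvPre_fold p [0] 0]
  cases i with
  | zero => simp [pvS]
  | succ j =>
    have hj : j < p.length := by omega
    rw [List.getD_eq_getElem _ 0 (by simp; omega)]
    simp only [List.singleton_append, List.getElem_cons_succ, List.getElem_map,
      List.getElem_range]
    simp [pvS]

-- the joint outer induction: A's fold and B's fold stay aligned
lemma pvJoint (p : List Int) (mt : List (List Int))
    (hmt : ∀ jj, jj < mt.length → mt.getD jj [] = pvLevel p jj)
    (hLn : p.length < 2 ^ mt.length) (hL1 : 0 < p.length → 1 ≤ mt.length) :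
    ∀ (d k : Nat), p.length - k ≤ d → k ≤ p.length → (k = 0 ∨ k ≤ pvLA p k) →
    pvLA p k ≤ p.length → ∀ (b : Int),
    ((PySem.List.pyRange (k : Int) (p.length : Int) 1).foldl (pvStepA p)
      (b, pvS p k (pvLA p k), ((pvLA p k : Nat) : Int))).1
    = ((PySem.List.pyRange (k : Int) (p.length : Int) 1).foldl (pvStepB p mt)
      (b, ((pvLA p k : Nat) : Int))).1 := by
  intro d
  induction d with
  | zero =>
    intro k hd hk hk0 hla b
    have : k = p.length := by omega
    subst this
    rw [PySem.List.pyRange_one_eq_nil (le_refl _)]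
    rfl
  | succ d ih =>
    intro k hd hk hk0 hla b
    rcases Nat.eq_or_lt_of_le hk with heq | hlt
    · subst heq
      rw [PySem.List.pyRange_one_eq_nil (le_refl _)]
      rfl
    · have hEnd : pvLA p (k + 1) = pvEndT p k (pvLA p k) := rfl
      have hge := pvEndT_ge p k (pvLA p k)
      have hle := pvEndT_le p k (pvLA p k) hla (by omega)
      have hla1 : pvLA p (k + 1) ≤ p.length := by rw [hEnd]; exact hle
      rw [PySem.List.pyRange_one_cons (by exact_mod_cast hlt)]
      simp only [List.foldl_cons, pvStepA, pvStepB]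
      rw [pvWhileA_step p hlt hk0 hla]
      -- B's end update equals pvLA (k+1)
      have hs0 : (if ((pvLA p k : Nat) : Int) < (k : Int) + 1 then (k : Int) + 1
          else ((pvLA p k : Nat) : Int)) = ((max (pvLA p k) (k + 1) : Nat) : Int) := by
        split <;> push_cast <;> omega
      have heB : (if ((max (pvLA p k) (k + 1) : Nat) : Int) < (p.length : Int)
          then pvFirstAbove p mt ((max (pvLA p k) (k + 1) : Nat) : Int)
            (PySem.List.pyGetD p (k : Int) 0 + PySem.List.pyGetD p ((k : Int) + 1) 0)
          else ((max (pvLA p k) (k + 1) : Nat) : Int)) = ((pvLA p (k + 1) : Nat) : Int) := by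
        rw [hEnd]
        unfold pvEndT
        by_cases hsn : max (pvLA p k) (k + 1) < p.length
        · rw [if_pos (by exact_mod_cast hsn), if_pos hsn]
          rw [PySem.List.pyGetD_natCast,
            show ((k : Int) + 1) = ((k + 1 : Nat) : Int) by push_cast; ring,
            PySem.List.pyGetD_natCast]
          exact pvFirstAbove_eq p mt _ _ hmt hLn (hL1 (by omega)) (by omega)
        · rw [if_neg (by exact_mod_cast hsn), if_neg hsn]
      have hkla : k ≤ pvLA p k ∨ pvLA p k = 0 := by
        rcases hk0 with h | h
        · right; rw [h]; rfl
        · left; exact h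
      have hsum : pvS p k (pvLA p k) + pvS p (pvLA p k) (pvLA p (k + 1)) =
          pvS p k (pvLA p (k + 1)) := by
        apply pvS_split
        · rcases hkla with h | h
          · exact h
          · omega
        · rw [hEnd]; exact hge.2
      have hnow : pvS p k (pvLA p k) + pvS p (pvLA p k) (pvLA p (k + 1))
          - PySem.List.pyGetD p (k : Int) 0 = pvS p (k + 1) (pvLA p (k + 1)) := by
        rw [hsum, PySem.List.pyGetD_natCast]
        have hsplit : pvS p k (pvLA p (k + 1)) = pvG p k + pvS p (k + 1) (pvLA p (k + 1)) :=
          pvS_cons p (a := k) (b := pvLA p (k + 1)) hlt (by rw [hEnd]; omega)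
        unfold pvG at hsplit
        omega
      have hcand : PySem.List.pyGetD (pvPreL p) ((pvLA p (k + 1) : Nat) : Int) 0
          - PySem.List.pyGetD (pvPreL p) (k : Int) 0 = pvS p k (pvLA p (k + 1)) := by
        rw [PySem.List.pyGetD_natCast, PySem.List.pyGetD_natCast,
          pvPre_getD p hla1, pvPre_getD p (by omega)]
        have := pvS_split p (Nat.zero_le k) (show k ≤ pvLA p (k + 1) by rw [hEnd]; omega)
        omega
      simp only [hs0, heB, hcand]
      rw [hnow, hsum]
      rw [show (k : Int) + 1 = ((k + 1 : Nat) : Int) by push_cast; ring]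
      exact ih (k + 1) (by omega) hlt (Or.inr (by rw [hEnd]; omega)) hla1
        (max b (pvS p k (pvLA p (k + 1))))

-- ===== VERDICT (by name: the statement is the Claim_ definition above) =====
theorem bestteamsum_spec : Claim_equal_bestteamsum := by
  intro p _
  unfold Spec_bestteamsum
  have ha : bestteamsum p
      = ((PySem.List.pyRange 0 (p.length : Int) 1).foldl (pvStepA p) (0, 0, 0)).1 := rfl
  have hb : bestteamsum_alt p
      = ((PySem.List.pyRange 0 (p.length : Int) 1).foldl
          (pvStepB p (if 0 < p.length then pvTabLoop p [p] 1 else [])) (0, 0)).1 := rfl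
  by_cases hn : 0 < p.length
  · rw [ha, hb, if_pos hn]
    have htab := pvTabLoop_spec p p.length 1 [p] (by omega) (le_refl _) (by simp)
      (by
        intro jj hjj
        have : jj = 0 := by omega
        subst this
        simpa using (pvLevel_zero p hn).symm)
      (by simpa using hn)
    have h0 := pvJoint p (pvTabLoop p [p] 1) htab.1 htab.2.1
      (fun _ => by have := htab.2.2; omega) p.length 0 (by omega) (Nat.zero_le _)
      (Or.inl rfl) (by simp [pvLA]) 0
    simp only [pvLA] at h0
    rw [show pvS p 0 0 = 0 by simp [pvS]] at h0
    exact h0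
  · have h0 : p.length = 0 := by omega
    have hp : p = [] := List.length_eq_zero_iff.mp h0
    subst hp
    rfl
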